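-- pv_equiv track=rewrite | github.com/roamingmonk/Redstone | utils/constants.py | calculate_button_layout
-- ===== SOURCE A (Python) =====
-- def calculate_button_layout(num_buttons, screen_width=1024, button_width=150, spacing=15):
--     """Calculate evenly spaced button positions"""
--     total_width = num_buttons * button_width + (num_buttons - 1) * spacing
--     start_x = (screen_width - total_width) // 2
--
--     positions = []
--     current_x = start_x
--     for i in range(num_buttons):
--         positions.append(current_x)
--         current_x += button_width + spacing
--
--     return positions, button_width
-- ===== SOURCE B (Python) =====
-- def calculate_button_layout(num_buttons, screen_width=1024, button_width=150, spacing=15):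
--     """Calculate evenly spaced button positions: start from the RIGHTMOST
--     button's x, collect positions walking leftwards, then reverse."""
--     step = button_width + spacing
--     total_width = num_buttons * button_width + (num_buttons - 1) * spacing
--     # x of the LAST button; walk left gathering positions in descending order
--     x = (screen_width - total_width) // 2 + (num_buttons - 1) * step
--     positions = []
--     n = num_buttons
--     while n > 0:
--         positions.append(x)
--         x -= step
--         n -= 1
--     positions.reverse()
--     return positions, button_width
-- ===== Notes on version B (the rewrite author's own statement) =====
-- stated objective: alternative
-- what changed: Instead of A's forward pass that increments a running x from start_x while appending, B computes the rightmost button's x first, walks leftwards collecting positions in descending order, and reverses the list at the end.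
import Mathlib
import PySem

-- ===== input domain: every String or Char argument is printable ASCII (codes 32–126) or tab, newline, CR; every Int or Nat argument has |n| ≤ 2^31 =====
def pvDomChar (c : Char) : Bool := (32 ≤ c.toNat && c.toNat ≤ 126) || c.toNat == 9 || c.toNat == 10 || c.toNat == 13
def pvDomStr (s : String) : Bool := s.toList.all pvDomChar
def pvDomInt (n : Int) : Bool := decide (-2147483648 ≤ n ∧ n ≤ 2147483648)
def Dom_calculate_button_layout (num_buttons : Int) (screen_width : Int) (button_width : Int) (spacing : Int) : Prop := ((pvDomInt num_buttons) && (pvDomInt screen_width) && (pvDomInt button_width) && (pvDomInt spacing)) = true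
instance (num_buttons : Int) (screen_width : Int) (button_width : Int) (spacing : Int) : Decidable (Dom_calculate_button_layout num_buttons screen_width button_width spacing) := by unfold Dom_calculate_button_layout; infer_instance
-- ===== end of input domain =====

-- B starts at the rightmost button's x, collects positions walking leftwards, then reverses; objective: alternative.

-- ===== PORT A =====
def calculate_button_layout (num_buttons : Int) (screen_width : Int) (button_width : Int) (spacing : Int) : List Int × Int :=
  let total_width := num_buttons * button_width + (num_buttons - 1) * spacing
  let start_x := PySem.Int.floordiv (screen_width - total_width) 2
  let st := (PySem.List.pyRange 0 num_buttons 1).foldl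
    (fun (st : List Int × Int) _ => (st.1 ++ [st.2], st.2 + (button_width + spacing)))
    ([], start_x)
  (st.1, button_width)

-- ===== PORT B =====
-- the 'while n > 0' loop of Source B: append x, step left, decrement n
def pvBuildDesc (step : Int) : Nat → Int → List Int → List Int
  | 0, _, acc => acc
  | n + 1, x, acc => pvBuildDesc step n (x - step) (acc ++ [x])

def calculate_button_layout_alt (num_buttons : Int) (screen_width : Int) (button_width : Int) (spacing : Int) : List Int × Int :=
  let step := button_width + spacing
  let total_width := num_buttons * button_width + (num_buttons - 1) * spacing
  let x := PySem.Int.floordiv (screen_width - total_width) 2 + (num_buttons - 1) * step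
  ((pvBuildDesc step num_buttons.toNat x []).reverse, button_width)

-- ===== PRECONDITION & SPEC =====
def Spec_calculate_button_layout (num_buttons : Int) (screen_width : Int) (button_width : Int) (spacing : Int) (out : List Int × Int) : Prop := out = calculate_button_layout_alt num_buttons screen_width button_width spacing
instance (num_buttons : Int) (screen_width : Int) (button_width : Int) (spacing : Int) (out : List Int × Int) : Decidable (Spec_calculate_button_layout num_buttons screen_width button_width spacing out) := by unfold Spec_calculate_button_layout; infer_instance

-- ===== CLAIM =====
def Claim_equal_calculate_button_layout : Prop := ∀ (num_buttons : Int) (screen_width : Int) (button_width : Int) (spacing : Int), Dom_calculate_button_layout num_buttons screen_width button_width spacing → Spec_calculate_button_layout num_buttons screen_width button_width spacing (calculate_button_layout num_buttons screen_width button_width spacing)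

-- ===== LEMMAS AND PROOFS =====

-- A's loop over range(0, n) starting at c appends exactly c + i*step at index i.
theorem pv_loop_eq (step : Int) (n : Nat) : ∀ (acc : List Int) (c : Int),
    (PySem.List.pyRange 0 (n : Int) 1).foldl
      (fun (st : List Int × Int) _ => (st.1 ++ [st.2], st.2 + step)) (acc, c)
    = (acc ++ (PySem.List.pyRange 0 (n : Int) 1).map (fun i => c + i * step), c + n * step) := by
  induction n with
  | zero => intro acc c; simp [PySem.List.pyRange_one_eq_nil]
  | succ n ih =>
    intro acc c
    rw [show ((n + 1 : Nat) : Int) = (n : Int) + 1 by push_cast; ring,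
        PySem.List.pyRange_one_succ_right (by positivity)]
    rw [List.foldl_append, ih acc c]
    simp only [List.foldl_cons, List.foldl_nil, List.map_append, List.map_cons, List.map_nil,
      List.append_assoc]
    exact Prod.ext rfl (by ring)

-- reversing B's descending collection gives the ascending indexed positions.
theorem pv_buildDesc_rev (step : Int) (n : Nat) : ∀ (x : Int) (acc : List Int),
    (pvBuildDesc step n x acc).reverse
    = (PySem.List.pyRange 0 (n : Int) 1).map (fun i => x - ((n : Int) - 1) * step + i * step) ++ acc.reverse := by
  induction n with
  | zero => intro x acc; simp [pvBuildDesc, PySem.List.pyRange_one_eq_nil]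
  | succ n ih =>
    intro x acc
    rw [show ((n + 1 : Nat) : Int) = (n : Int) + 1 by push_cast; ring,
        PySem.List.pyRange_one_succ_right (by positivity)]
    simp only [pvBuildDesc, ih, List.reverse_append, List.reverse_cons, List.reverse_nil,
      List.map_append, List.map_cons, List.map_nil, List.append_assoc, List.cons_append,
      List.nil_append]
    congr 1
    · apply List.map_congr_left
      intro i _
      ring
    · congr 2
      ring

theorem calculate_button_layout_eq (num_buttons screen_width button_width spacing : Int) :
    calculate_button_layout num_buttons screen_width button_width spacing
    = calculate_button_layout_alt num_buttons screen_width button_width spacing := by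
  unfold calculate_button_layout calculate_button_layout_alt
  by_cases h : num_buttons ≤ 0
  · have : num_buttons.toNat = 0 := by omega
    simp [PySem.List.pyRange_one_eq_nil h, this, pvBuildDesc]
  · have hn : num_buttons = ((num_buttons.toNat : Nat) : Int) := by omega
    rw [hn]
    simp only [pv_loop_eq, pv_buildDesc_rev, List.reverse_nil, List.nil_append, List.append_nil]
    congr 1
    apply List.map_congr_left
    intro i _
    simp only [Int.toNat_natCast]
    ring

-- ===== VERDICT =====
theorem calculate_button_layout_spec : Claim_equal_calculate_button_layout := by
  intro n sw bw sp _
  unfold Spec_calculate_button_layout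
  exact calculate_button_layout_eq n sw bw sp
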